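-- pv_equiv track=rewrite | github.com/ChristianGroeber/Python | M151/wheelofluck/login/views.py | get_index_of_substring
-- ===== SOURCE A (Python) =====
-- def get_index_of_substring(sub, word, occurance):
--     arr = list(word)
--     x = 0
--     found = 0
--     for i in arr:
--         x = x + 1
--         if i == sub:
--             found = found + 1
--             if found == occurance:
--                 return x
-- ===== SOURCE B (Python) =====
-- def get_index_of_substring(sub, word, occurance):
--     positions = [i + 1 for i, c in enumerate(word) if c == sub]
--     if 1 <= occurance <= len(positions):
--         return positions[occurance - 1]
--     return None
-- ===== Notes on version B (the rewrite author's own statement) =====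
-- stated objective: simpler
-- what changed: Replaces the stateful counter loop with early return by building the list of all 1-based match positions in one comprehension and selecting the requested one with a bounds guard.
import Mathlib
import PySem

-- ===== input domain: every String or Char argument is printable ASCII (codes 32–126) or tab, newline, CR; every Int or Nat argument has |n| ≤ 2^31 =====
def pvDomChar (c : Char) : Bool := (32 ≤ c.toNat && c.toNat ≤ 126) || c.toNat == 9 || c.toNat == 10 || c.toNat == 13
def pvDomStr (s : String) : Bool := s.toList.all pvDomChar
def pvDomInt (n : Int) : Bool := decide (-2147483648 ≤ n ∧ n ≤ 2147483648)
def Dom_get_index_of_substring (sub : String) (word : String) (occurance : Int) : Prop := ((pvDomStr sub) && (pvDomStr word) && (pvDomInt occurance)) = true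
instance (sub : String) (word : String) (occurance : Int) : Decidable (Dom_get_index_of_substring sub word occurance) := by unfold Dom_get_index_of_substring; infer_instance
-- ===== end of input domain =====

-- B builds the list of all 1-based match positions once and selects the requested one
-- with a bounds guard, instead of A's stateful counter loop with early return (objective: simpler).

-- ===== PORT A =====
-- the for-loop over list(word) with accumulators x (position) and found (match count)
def pvLoopA (sub : String) (occurance : Int) : List Char → Int → Int → Option Int
  | [], _, _ => none
  | c :: rest, x, found =>
    let x := x + 1
    if String.mk [c] = sub then
      let found := found + 1
      if found = occurance then some x else pvLoopA sub occurance rest x found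
    else pvLoopA sub occurance rest x found

def get_index_of_substring (sub : String) (word : String) (occurance : Int) : Option Int :=
  pvLoopA sub occurance word.toList 0 0

-- ===== PORT B =====
def get_index_of_substring_alt (sub : String) (word : String) (occurance : Int) : Option Int :=
  let positions : List Int :=
    (PySem.List.enumerate word.toList 0).filterMap
      (fun p => if String.mk [p.2] = sub then some (p.1 + 1) else none)
  if 1 ≤ occurance ∧ occurance ≤ positions.length then
    PySem.List.pyGet? positions (occurance - 1)
  else none

-- ===== PRECONDITION & SPEC =====
def Spec_get_index_of_substring (sub : String) (word : String) (occurance : Int) (out : Option Int) : Prop := out = get_index_of_substring_alt sub word occurance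
instance (sub : String) (word : String) (occurance : Int) (out : Option Int) : Decidable (Spec_get_index_of_substring sub word occurance out) := by unfold Spec_get_index_of_substring; infer_instance

-- ===== CLAIM (what is proved, stated in full; the proofs are below) =====
def Claim_equal_get_index_of_substring : Prop := ∀ (sub : String) (word : String) (occurance : Int), Dom_get_index_of_substring sub word occurance → Spec_get_index_of_substring sub word occurance (get_index_of_substring sub word occurance)

-- ===== LEMMAS AND PROOFS =====

-- the 1-based positions of matches in l, when scanning starts at accumulated position x
def pvPos (sub : String) : List Char → Int → List Int
  | [], _ => []
  | c :: rest, x =>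
    if String.mk [c] = sub then (x + 1) :: pvPos sub rest (x + 1)
    else pvPos sub rest (x + 1)

lemma pvPos_eq_filterMap (sub : String) (l : List Char) (x : Int) :
    (PySem.List.enumerate l x).filterMap
      (fun p => if String.mk [p.2] = sub then some (p.1 + 1) else none) = pvPos sub l x := by
  induction l generalizing x with
  | nil => simp [PySem.List.enumerate_nil, pvPos]
  | cons c rest ih =>
    simp only [PySem.List.enumerate_cons, List.filterMap_cons, pvPos]
    by_cases hc : String.mk [c] = sub <;> simp [hc, ih]

lemma pvLoopA_eq_pyGet (sub : String) (occurance : Int) (l : List Char) :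
    ∀ (x found : Int), found < occurance →
      pvLoopA sub occurance l x found =
        PySem.List.pyGet? (pvPos sub l x) (occurance - found - 1) := by
  induction l with
  | nil => intro x found _; simp [pvLoopA, pvPos, PySem.List.pyGet?, PySem.List.pyIdx?]
  | cons c rest ih =>
    intro x found h
    simp only [pvLoopA, pvPos]
    by_cases hc : String.mk [c] = sub
    · simp only [hc, if_true]
      by_cases he : found + 1 = occurance
      · have : occurance - found - 1 = 0 := by omega
        simp [he, this, PySem.List.pyGet?, PySem.List.pyIdx?]
      · have h' : found + 1 < occurance := by omega
        rw [if_neg he, ih (x + 1) (found + 1) h']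
        have h0 : (0:Int) < occurance - found - 1 := by omega
        have : occurance - found - 1 = (occurance - (found + 1) - 1) + 1 := by ring
        rw [this]
        simp only [PySem.List.pyGet?, PySem.List.pyIdx?]
        have hn : ∃ n : Nat, occurance - (found + 1) - 1 = (n : Int) := by
          refine ⟨(occurance - (found + 1) - 1).toNat, ?_⟩; omega
        obtain ⟨n, hn⟩ := hn
        rw [hn]
        norm_num
        split <;> split <;> simp_all <;> omega
    · rw [if_neg hc, if_neg hc, ih (x + 1) found h]

lemma pvLoopA_none_of_le (sub : String) (occurance : Int) (l : List Char) :
    ∀ (x found : Int), occurance ≤ found →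
      pvLoopA sub occurance l x found = none := by
  induction l with
  | nil => intro _ _ _; rfl
  | cons c rest ih =>
    intro x found h
    simp only [pvLoopA]
    by_cases hc : String.mk [c] = sub
    · have hne : ¬ (found + 1 = occurance) := by omega
      simp only [hc, if_true, if_neg hne]
      exact ih _ _ (by omega)
    · rw [if_neg hc]; exact ih _ _ h

lemma pyGet?_none_of_ge {l : List Int} {i : Int} (h : (l.length : Int) ≤ i) :
    PySem.List.pyGet? l i = none := by
  rw [PySem.List.pyGet?_eq_none_iff]
  simp [PySem.Raise.InRange]
  omega

-- ===== VERDICT (by name: the statement is the Claim_ definition above) =====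
theorem get_index_of_substring_spec : Claim_equal_get_index_of_substring := by
  intro sub word occurance _
  unfold Spec_get_index_of_substring get_index_of_substring get_index_of_substring_alt
  rw [pvPos_eq_filterMap]
  by_cases h1 : 1 ≤ occurance
  · rw [pvLoopA_eq_pyGet sub occurance word.toList 0 0 (by omega)]
    by_cases h2 : occurance ≤ ((pvPos sub word.toList 0).length : Int)
    · simp [h1, h2]
    · rw [if_neg (by tauto), pyGet?_none_of_ge (by omega)]
  · rw [pvLoopA_none_of_le sub occurance word.toList 0 0 (by omega), if_neg (by omega)]
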